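-- pv_equiv track=rewrite | github.com/datrix-yt/chatTuber | chessengine.py | finToboard
-- ===== SOURCE A (Python) =====
-- import functools
-- import operator
--
-- def finToboard(board):
--     pieces = ["R","N","B","Q","K","r","n","b","q","k","p","P"]
--     for i in range(len(board)):
--         board[i] = list(board[i])
--
--     for i in range(len(board)):
--         for j in range(len(board[i])):
--             if board[i][j] not in pieces and board[i][j] != '-':
--                 num = int(board[i].pop(j))
--                 string = list(num*'-')
--                 board[i].insert(j,string)
--         board[i] = functools.reduce(operator.iconcat, board[i], [])
--     return board
-- ===== SOURCE B (Python) =====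
-- def finToboard(board):
--     pieces = {"R", "N", "B", "Q", "K", "r", "n", "b", "q", "k", "p", "P"}
--     for i, row in enumerate(board):
--         new = []
--         for ch in row:
--             if ch in pieces or ch == '-':
--                 new.append(ch)
--             else:
--                 new.extend(int(ch) * '-')
--         board[i] = new
--     return board
-- ===== Notes on version B (the rewrite author's own statement) =====
-- stated objective: simpler
-- what changed: B builds each expanded row in one forward pass (append piece/dash, extend with int(ch) dashes), replacing A's in-place pop/insert of nested lists followed by a functools.reduce(iconcat) flatten pass.
import Mathlib
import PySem

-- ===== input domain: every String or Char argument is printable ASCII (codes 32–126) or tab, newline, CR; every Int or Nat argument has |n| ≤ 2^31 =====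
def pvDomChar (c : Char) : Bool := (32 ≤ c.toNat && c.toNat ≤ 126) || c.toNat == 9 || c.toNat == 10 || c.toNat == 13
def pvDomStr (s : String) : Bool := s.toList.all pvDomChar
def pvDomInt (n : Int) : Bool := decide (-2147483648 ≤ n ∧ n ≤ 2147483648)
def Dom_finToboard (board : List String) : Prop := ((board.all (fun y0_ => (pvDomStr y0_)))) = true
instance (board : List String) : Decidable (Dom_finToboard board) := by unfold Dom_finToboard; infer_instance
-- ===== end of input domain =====

-- B rebuilds each row flat in one pass instead of A's pop/insert of nested lists plus a
-- reduce-flatten pass; both Pythons mutate `board` in place the same way (the claim is about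
-- the return value).

-- ===== PORT A =====
-- A's row cells are heterogeneous after the inner loop: single-char strings or lists of "-".
inductive PvCell where
  | chr : String → PvCell
  | lst : List String → PvCell
deriving DecidableEq, Repr

def pvPieces : List String := ["R","N","B","Q","K","r","n","b","q","k","p","P"]

-- one step of A's inner loop 'for j in range(len(board[i]))': pop(j) then insert(j, …)
def pvStep (row : List PvCell) (j : Nat) : List PvCell :=
  match PySem.List.pyGet? row (j : Int) with
  | none => row            -- IndexError (unreachable: j < len(row))
  | some cell =>
    match cell with
    | .chr c =>
        if ¬ (pvPieces.contains c) ∧ c ≠ "-" then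
          match PySem.List.pop? row (j : Int) with
          | none => row    -- unreachable
          | some (x, rest) =>
            -- int(popped): ValueError excluded by Pre_; getD 0 is never the Python value inside Pre_
            let num : Int := (PySem.Int.ofStr? (match x with | .chr s => s | .lst _ => "")).getD 0
            PySem.List.insert rest (j : Int) (.lst (List.replicate num.toNat "-"))
        else row
    | .lst _ => row        -- Python would raise TypeError here; unreachable from the initial all-char row

def pvFlat (cell : PvCell) : List String :=
  match cell with | .chr c => [c] | .lst l => l

def finToboard (board : List String) : List (List String) :=
  -- first loop: board[i] = list(board[i])
  let b1 : List (List PvCell) :=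
    board.map (fun s => s.toList.map (fun c => PvCell.chr (String.mk [c])))
  -- second loop: inner j-loop, then functools.reduce(operator.iconcat, board[i], [])
  b1.map (fun row =>
    ((List.range row.length).foldl pvStep row).foldl (fun acc cell => acc ++ pvFlat cell) [])

-- ===== PORT B =====
def finToboard_alt (board : List String) : List (List String) :=
  board.map (fun s =>
    s.toList.foldl (fun new c =>
      let ch := String.mk [c]
      if pvPieces.contains ch || ch == "-" then new ++ [ch]
      else new ++ List.replicate ((PySem.Int.ofStr? ch).getD 0).toNat "-") [])

-- ===== PRECONDITION & SPEC =====
-- Pre_ excludes inputs where A raises ValueError: every character must be a piece letter, '-' or a digit.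
def Pre_finToboard (board : List String) : Prop :=
  (board.all (fun s => s.toList.all (fun c =>
    pvPieces.contains (String.mk [c]) || c == '-' || c.isDigit))) = true
instance (board : List String) : Decidable (Pre_finToboard board) := by
  unfold Pre_finToboard; infer_instance

def pvWitness_finToboard : List String := ["r2k", "8", "-pP"]

def Spec_finToboard (board : List String) (out : List (List String)) : Prop := out = finToboard_alt board
instance (board : List String) (out : List (List String)) : Decidable (Spec_finToboard board out) := by unfold Spec_finToboard; infer_instance

-- ===== CLAIM (what is proved, stated in full; the proofs are below) =====
def Claim_equal_finToboard : Prop := ∀ (board : List String), Dom_finToboard board → Pre_finToboard board → Spec_finToboard board (finToboard board)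

-- ===== LEMMAS AND PROOFS =====

-- the transformation A's inner loop applies to each (original) cell
def pvTr (cell : PvCell) : PvCell :=
  match cell with
  | .chr c =>
      if ¬ (pvPieces.contains c) ∧ c ≠ "-" then
        .lst (List.replicate ((PySem.Int.ofStr? c).getD 0).toNat "-")
      else .chr c
  | .lst l => .lst l

theorem pvStep_at (done : List PvCell) (c : PvCell) (rest : List PvCell) :
    pvStep (done ++ c :: rest) done.length = done ++ pvTr c :: rest := by
  unfold pvStep pvTr
  rw [PySem.List.pyGet?_append_length]
  cases c with
  | chr s =>
      by_cases h1 : s ∈ pvPieces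
      · simp [h1]
      · by_cases h2 : s = "-"
        · simp [h2]
        · have hlt : done.length < (done ++ PvCell.chr s :: rest).length := by simp
          have hpop := PySem.List.pop?_natCast (done ++ PvCell.chr s :: rest) done.length hlt
          have hget : (done ++ PvCell.chr s :: rest)[done.length] = PvCell.chr s := by
            simp [List.getElem_append_right (le_refl done.length)]
          have herase : (done ++ PvCell.chr s :: rest).eraseIdx done.length = done ++ rest := by
            rw [List.eraseIdx_append_of_length_le (le_refl done.length)]
            simp
          rw [hget, herase] at hpop
          have hins := PySem.List.insert_natCast (done ++ rest) done.length
            (PvCell.lst (List.replicate ((PySem.Int.ofStr? s).getD 0).toNat "-")) (by simp)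
          simp [h1, h2, hpop, hins]
  | lst l => simp

theorem pvLoop_inv (rest : List PvCell) : ∀ (done : List PvCell),
    (List.range' done.length rest.length).foldl pvStep (done ++ rest)
      = done ++ rest.map pvTr := by
  induction rest with
  | nil => intro done; simp
  | cons c cs ih =>
      intro done
      rw [List.length_cons, List.range'_succ, List.foldl_cons, pvStep_at]
      have := ih (done ++ [pvTr c])
      simpa using this

theorem pvLoop_eq (row : List PvCell) :
    (List.range row.length).foldl pvStep row = row.map pvTr := by
  have := pvLoop_inv row []
  simpa [List.range_eq_range'] using this

def pvG (c : Char) : List String :=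
  let ch := String.mk [c]
  if pvPieces.contains ch || ch == "-" then [ch]
  else List.replicate ((PySem.Int.ofStr? ch).getD 0).toNat "-"

theorem pvG_pos (c : Char) (h : String.mk [c] ∈ pvPieces ∨ String.mk [c] = "-") :
    pvG c = [String.mk [c]] := by
  rcases h with h | h <;> simp [pvG, h]

theorem pvG_neg (c : Char) (h1 : String.mk [c] ∉ pvPieces) (h2 : String.mk [c] ≠ "-") :
    pvG c = List.replicate ((PySem.Int.ofStr? (String.mk [c])).getD 0).toNat "-" := by
  simp [pvG, h1, h2]

theorem pvB_foldl (cs : List Char) (acc : List String) :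
    cs.foldl (fun new c =>
        let ch := String.mk [c]
        if pvPieces.contains ch || ch == "-" then new ++ [ch]
        else new ++ List.replicate ((PySem.Int.ofStr? ch).getD 0).toNat "-") acc
      = acc ++ cs.flatMap pvG := by
  have hf : (fun (new : List String) (c : Char) =>
        let ch := String.mk [c]
        if pvPieces.contains ch || ch == "-" then new ++ [ch]
        else new ++ List.replicate ((PySem.Int.ofStr? ch).getD 0).toNat "-")
      = fun new c => new ++ pvG c := by
    funext new c
    unfold pvG
    dsimp only
    split_ifs <;> rfl
  rw [hf, PySem.List.foldl_append_eq_flatMap]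

theorem pvFlat_tr_eq (c : Char) :
    pvFlat (pvTr (PvCell.chr (String.mk [c]))) = pvG c := by
  by_cases h1 : String.mk [c] ∈ pvPieces
  · simp [pvFlat, pvTr, pvG_pos c (Or.inl h1), h1]
  · by_cases h2 : String.mk [c] = "-"
    · simp [pvFlat, pvTr, pvG_pos c (Or.inr h2), h2]
    · simp [pvFlat, pvTr, pvG_neg c h1 h2, h1, h2]

theorem pvRow_eq (cs : List Char) :
    ((List.range (cs.map (fun c => PvCell.chr (String.mk [c]))).length).foldl pvStep
        (cs.map (fun c => PvCell.chr (String.mk [c])))).foldl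
      (fun acc cell => acc ++ pvFlat cell) []
    = cs.foldl (fun new c =>
        let ch := String.mk [c]
        if pvPieces.contains ch || ch == "-" then new ++ [ch]
        else new ++ List.replicate ((PySem.Int.ofStr? ch).getD 0).toNat "-") [] := by
  rw [pvLoop_eq, PySem.List.foldl_append_eq_flatMap, pvB_foldl]
  simp only [List.nil_append, List.map_map, List.flatMap_map]
  exact List.flatMap_congr (fun c _ => pvFlat_tr_eq c)

-- ===== VERDICT (by name: the statement is the Claim_ definition above) =====
theorem finToboard_spec : Claim_equal_finToboard := by
  intro board _ _
  unfold Spec_finToboard finToboard finToboard_alt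
  simp only [List.map_map]
  apply List.map_congr_left
  intro s _
  exact pvRow_eq s.toList
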